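-- pv_equiv track=rewrite | github.com/DesertFearful/AoC24 | day5/day5.py | p2_sol
-- ===== SOURCE A (Python) =====
-- def check_row(arr, rules):
--     seen = set()
--     for i in range(len(arr)):
--         if arr[i] in rules:
--             for x in rules[arr[i]]:
--                 if x in seen:
--                     return False
--         seen.add(arr[i])
--     return True
--
-- def correct_row(arr, rules):
--     seen = set()
--     for i in range(len(arr)):
--         if arr[i] in rules:
--             for x in rules[arr[i]]:
--                 if x in seen:
--                     j = arr.index(x)
--                     arr[j], arr[i] = arr[i], arr[j]
--                     return
--         seen.add(arr[i])
--     return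
--
-- def p2_sol(data, rules):
--     res = 0
--     for i in range(len(data)):
--         check = check_row(data[i], rules)
--         if not check:
--             while not check:
--                 correct_row(data[i], rules)
--                 check = check_row(data[i], rules)
--             res += data[i][len(data[i])//2]
--     return res
-- ===== SOURCE B (Python) =====
-- def p2_sol(data, rules):
--     res = 0
--     for row in data:
--         if violates(row, rules):
--             mid = len(row) // 2
--             res += next(x for x in row if preds(x, row, rules) == mid)
--     return res
--
-- def violates(row, rules):
--     for i in range(len(row)):
--         for y in row[:i]:
--             if y in rules.get(row[i], []):
--                 return True
--     return False
--
-- def preds(x, row, rules):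
--     return sum(1 for y in row if y != x and x in rules.get(y, []))
-- ===== Notes on version B (the rewrite author's own statement) =====
-- stated objective: alternative
-- what changed: B replaces A's repeat-swap-until-valid fixpoint loop per row with a single counting pass: a row is flagged by a direct pairwise violation test and its reordered middle element is selected as the element whose required-predecessor count equals len(row)//2, with no reordering at all.
-- outside the precondition, e.g. on p2_sol([[1, 2, 3]], {3: [1]}): A returns 2, B returns 1; on p2_sol([[2, 1, 2]], {2: [1]}): A returns 2, B raises StopIteration
import Mathlib
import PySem

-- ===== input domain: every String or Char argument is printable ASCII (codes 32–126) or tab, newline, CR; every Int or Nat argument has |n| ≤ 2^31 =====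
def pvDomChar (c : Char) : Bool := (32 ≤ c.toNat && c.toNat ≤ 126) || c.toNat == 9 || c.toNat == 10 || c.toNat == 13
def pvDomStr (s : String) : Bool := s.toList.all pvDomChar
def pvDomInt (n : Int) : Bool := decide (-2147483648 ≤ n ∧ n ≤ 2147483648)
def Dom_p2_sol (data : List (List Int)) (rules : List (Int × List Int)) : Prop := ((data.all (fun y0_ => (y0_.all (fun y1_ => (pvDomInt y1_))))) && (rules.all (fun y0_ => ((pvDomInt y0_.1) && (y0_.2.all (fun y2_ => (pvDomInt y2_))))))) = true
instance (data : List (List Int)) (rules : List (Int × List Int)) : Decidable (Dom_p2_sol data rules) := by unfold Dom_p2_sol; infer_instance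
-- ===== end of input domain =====

-- B replaces A's repeat-swap-until-valid loop per row by one counting pass: flag a row by a direct pairwise
-- violation test and select the element whose required-predecessor count equals len(row)//2 (objective: alternative).
-- A mutates its rows in place; the equivalence claimed here is about the return value only.

-- ===== PORT A =====

def checkRowGo (rules : List (Int × List Int)) (seen : PySem.Set Int) : List Int → Bool
  | [] => true
  | a :: t =>
    if (((PySem.Dict.mk rules).get? a).getD []).any (fun x => PySem.Set.contains seen x) then false
    else checkRowGo rules (PySem.Set.add seen a) t

def checkRow (rules : List (Int × List Int)) (arr : List Int) : Bool :=
  checkRowGo rules PySem.Set.empty arr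

def correctRowGo (rules : List (Int × List Int)) (pre : List Int) (seen : PySem.Set Int) : List Int → List Int
  | [] => pre.reverse
  | a :: t =>
    match (((PySem.Dict.mk rules).get? a).getD []).find? (fun x => PySem.Set.contains seen x) with
    | some x =>
      let arr := pre.reverse ++ a :: t
      let j : Nat := (PySem.List.index? arr x).getD 0
      let jv : Int := PySem.List.pyGetD arr (j : Int) a
      PySem.List.pySetD (PySem.List.pySetD arr (j : Int) a) ((pre.reverse.length : Nat) : Int) jv
    | none => correctRowGo rules (a :: pre) (PySem.Set.add seen a) t

def correctRow (rules : List (Int × List Int)) (arr : List Int) : List Int :=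
  correctRowGo rules [] PySem.Set.empty arr

def fixRow (rules : List (Int × List Int)) : Nat → List Int → List Int
  | 0, arr => arr
  | fuel + 1, arr =>
    if checkRow rules arr then arr else fixRow rules fuel (correctRow rules arr)

def p2_sol (data : List (List Int)) (rules : List (Int × List Int)) : Int :=
  data.foldl (fun res row =>
    if checkRow rules row then res
    else
      res + PySem.List.pyGetD (fixRow rules (row.length * row.length + 1) row)
        (PySem.Int.floordiv (PySem.List.len (fixRow rules (row.length * row.length + 1) row)) 2) 0) 0

-- ===== PORT B =====
def violatesGo (rules : List (Int × List Int)) (pre : List Int) : List Int → Bool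
  | [] => false
  | a :: t =>
    if pre.any (fun y => (((PySem.Dict.mk rules).get? a).getD []).contains y) then true
    else violatesGo rules (pre ++ [a]) t

def predsB (rules : List (Int × List Int)) (x : Int) (row : List Int) : Nat :=
  row.countP (fun y => y != x && (((PySem.Dict.mk rules).get? y).getD []).contains x)

def p2_sol_alt (data : List (List Int)) (rules : List (Int × List Int)) : Int :=
  data.foldl (fun res row =>
    if violatesGo rules [] row then
      res + ((row.find? (fun x => predsB rules x row == row.length / 2)).getD 0)
    else res) 0

-- ===== PRECONDITION & SPEC =====
def pvRb (rules : List (Int × List Int)) (a b : Int) : Bool :=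
  (((PySem.Dict.mk rules).get? a).getD []).contains b

def pvRowValid (rules : List (Int × List Int)) (r : List Int) : Prop :=
  List.Pairwise (fun a b => pvRb rules b a = false) r

def pvRowSTO (rules : List (Int × List Int)) (r : List Int) : Prop :=
  r.Nodup ∧ (∀ a ∈ r, ∀ b ∈ r, a ≠ b → pvRb rules a b = !pvRb rules b a) ∧
  (∀ a ∈ r, ∀ b ∈ r, ∀ c ∈ r, pvRb rules a b = true → pvRb rules b c = true → pvRb rules a c = true)

-- Pre_ excludes inputs where A's swap loop diverges (cyclic rule relations) and rule-violating rows whose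
-- rule relation is not a strict total order over distinct row elements, where the resting arrangement of
-- A's swap loop is an accident of its swap order.
def Pre_p2_sol (data : List (List Int)) (rules : List (Int × List Int)) : Prop :=
  ∀ r ∈ data, pvRowValid rules r ∨ pvRowSTO rules r
instance (data : List (List Int)) (rules : List (Int × List Int)) : Decidable (Pre_p2_sol data rules) := by
  unfold Pre_p2_sol pvRowValid pvRowSTO; infer_instance

def pvWitness_p2_sol : List (List Int) × (List (Int × List Int)) := ([[1, 2], [2, 1]], [(2, [1])])

def Spec_p2_sol (data : List (List Int)) (rules : List (Int × List Int)) (out : Int) : Prop := out = p2_sol_alt data rules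
instance (data : List (List Int)) (rules : List (Int × List Int)) (out : Int) : Decidable (Spec_p2_sol data rules out) := by unfold Spec_p2_sol; infer_instance

-- ===== CLAIM (what is proved, stated in full; the proofs are below) =====
def Claim_equal_p2_sol : Prop := ∀ (data : List (List Int)) (rules : List (Int × List Int)), Dom_p2_sol data rules → Pre_p2_sol data rules → Spec_p2_sol data rules (p2_sol data rules)

-- ===== LEMMAS AND PROOFS =====
def pvInv (rules : List (Int × List Int)) : List Int → Nat
  | [] => 0
  | a :: t => t.countP (fun y => pvRb rules y a) + pvInv rules t

def pvCross (rules : List (Int × List Int)) (xs ys : List Int) : Nat :=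
  (xs.map (fun x => ys.countP (fun y => pvRb rules y x))).sum

lemma pvInv_append (rules : List (Int × List Int)) (xs ys : List Int) :
    pvInv rules (xs ++ ys) = pvInv rules xs + pvCross rules xs ys + pvInv rules ys := by
  induction xs with
  | nil => simp [pvInv, pvCross]
  | cons x xs ih => simp [pvInv, pvCross, List.countP_append, ih, pvCross]; ring

lemma pvCross_perm (rules : List (Int × List Int)) (xs : List Int) {ys ys' : List Int}
    (h : ys.Perm ys') : pvCross rules xs ys = pvCross rules xs ys' := by
  simp [pvCross, h.countP_eq]

lemma pvCross_append_right (rules : List (Int × List Int)) (xs ys zs : List Int) :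
    pvCross rules xs (ys ++ zs) = pvCross rules xs ys + pvCross rules xs zs := by
  induction xs with
  | nil => simp [pvCross]
  | cons x xs ih => simp [pvCross, List.countP_append] at ih ⊢; omega

lemma pvCross_singleton_left (rules : List (Int × List Int)) (x : Int) (ys : List Int) :
    pvCross rules [x] ys = ys.countP (fun y => pvRb rules y x) := by
  simp [pvCross]

lemma pvCross_singleton_right (rules : List (Int × List Int)) (xs : List Int) (b : Int) :
    pvCross rules xs [b] = xs.countP (fun c => pvRb rules b c) := by
  induction xs with
  | nil => simp [pvCross]
  | cons x xs ih =>
    simp [pvCross, List.countP_cons] at ih ⊢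
    rw [ih]; by_cases h : pvRb rules b x <;> simp [h] <;> omega

lemma pvInv_le (rules : List (Int × List Int)) (r : List Int) :
    pvInv rules r ≤ r.length * r.length := by
  induction r with
  | nil => simp [pvInv]
  | cons a t ih =>
    have h := List.countP_le_length (l := t) (p := fun y => pvRb rules y a)
    simp only [pvInv, List.length_cons]
    nlinarith

lemma checkRowGo_cond (rules : List (Int × List Int)) (a : Int) (seen : PySem.Set Int)
    (pre : List Int) (hseen : ∀ z : Int, z ∈ seen ↔ z ∈ pre) :
    ((((PySem.Dict.mk rules).get? a).getD []).any (fun x => PySem.Set.contains seen x) = false)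
      ↔ (∀ z ∈ pre, pvRb rules a z = false) := by
  simp only [List.any_eq_false, pvRb]
  constructor
  · intro h z hz
    by_contra hb
    simp only [Bool.not_eq_false] at hb
    have := h _ (by simpa using (List.contains_iff_mem).mp hb)
    simp [hseen] at this
    exact this hz
  · intro h x hx
    simp only [PySem.Set.contains_eq_listContains]
    intro hc
    have hzpre : x ∈ pre := (hseen x).mp (by simpa using hc)
    have := h x hzpre
    simp at this
    exact this (by simpa using hx)

lemma checkRowGo_eq_true_iff (rules : List (Int × List Int)) :
    ∀ (t : List Int) (seen : PySem.Set Int) (pre : List Int),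
    (∀ z : Int, z ∈ seen ↔ z ∈ pre) →
    (checkRowGo rules seen t = true ↔
      ((∀ a ∈ t, ∀ z ∈ pre, pvRb rules a z = false) ∧
        List.Pairwise (fun x y => pvRb rules y x = false) t)) := by
  intro t
  induction t with
  | nil => intro seen pre h; simp [checkRowGo]
  | cons a t ih =>
    intro seen pre hseen
    by_cases hc : (((PySem.Dict.mk rules).get? a).getD []).any (fun x => PySem.Set.contains seen x)
    · simp only [checkRowGo, hc, if_true]
      have : ¬ (∀ z ∈ pre, pvRb rules a z = false) := by
        intro h
        have h2 := (checkRowGo_cond rules a seen pre hseen).mpr h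
        rw [h2] at hc
        simp at hc
      constructor
      · intro h; cases h
      · rintro ⟨h1, _⟩
        exact absurd (h1 a (by simp)) this
    · simp only [checkRowGo, hc, if_false, Bool.false_eq_true]
      have hseen' : ∀ z : Int, z ∈ PySem.Set.add seen a ↔ z ∈ a :: pre := by
        intro z; rw [PySem.Set.mem_add, hseen]; simp; tauto
      rw [ih (PySem.Set.add seen a) (a :: pre) hseen']
      have hcond := (checkRowGo_cond rules a seen pre hseen).mp (by simpa using hc)
      simp only [List.pairwise_cons, List.mem_cons]
      constructor
      · rintro ⟨h1, h2⟩
        refine ⟨?_, ?_, h2⟩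
        · rintro b hb z hz
          rcases hb with rfl | hb
          · exact hcond z hz
          · exact h1 b hb z (Or.inr hz)
        · intro y hy
          exact h1 y hy a (Or.inl rfl)
      · rintro ⟨h1, h2, h3⟩
        refine ⟨?_, h3⟩
        intro b hb z hz
        rcases hz with rfl | hz'
        · exact h2 b hb
        · exact h1 b (Or.inr hb) z hz'

lemma checkRow_eq_true_iff (rules : List (Int × List Int)) (r : List Int) :
    checkRow rules r = true ↔ pvRowValid rules r := by
  rw [checkRow, checkRowGo_eq_true_iff rules r PySem.Set.empty [] (by simp [PySem.Set.empty])]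
  simp [pvRowValid]

lemma violatesGo_eq_false_iff (rules : List (Int × List Int)) :
    ∀ (t pre : List Int),
    (violatesGo rules pre t = false ↔
      ((∀ a ∈ t, ∀ z ∈ pre, pvRb rules a z = false) ∧
        List.Pairwise (fun x y => pvRb rules y x = false) t)) := by
  intro t
  induction t with
  | nil => intro pre; simp [violatesGo]
  | cons a t ih =>
    intro pre
    by_cases hc : pre.any (fun y => (((PySem.Dict.mk rules).get? a).getD []).contains y)
    · simp only [violatesGo, hc, if_true]
      rcases List.any_eq_true.mp hc with ⟨z, hz, hrb⟩
      constructor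
      · intro h; cases h
      · rintro ⟨h1, _⟩
        have := h1 a (by simp) z hz
        rw [pvRb] at this
        rw [this] at hrb; cases hrb
    · have hc' : (pre.any fun y => (((PySem.Dict.mk rules).get? a).getD []).contains y) = false := by
        simpa using hc
      simp only [violatesGo, hc', Bool.false_eq_true, if_false]
      rw [ih (pre ++ [a])]
      have hcond : ∀ z ∈ pre, pvRb rules a z = false := by
        intro z hz
        by_contra hb
        simp only [Bool.not_eq_false] at hb
        exact hc (List.any_eq_true.mpr ⟨z, hz, by rw [pvRb] at hb; exact hb⟩)
      simp only [List.pairwise_cons, List.mem_cons, List.mem_append]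
      constructor
      · rintro ⟨h1, h2⟩
        refine ⟨?_, ?_, h2⟩
        · rintro b hb z hz
          rcases hb with rfl | hb
          · exact hcond z hz
          · exact h1 b hb z (Or.inl hz)
        · intro y hy
          exact h1 y hy a (Or.inr (Or.inl rfl))
      · rintro ⟨h1, h2, h3⟩
        refine ⟨?_, h3⟩
        intro b hb z hz
        rcases hz with hz' | (rfl | h0)
        · exact h1 b (Or.inr hb) z hz'
        · exact h2 b hb
        · exact absurd h0 (List.not_mem_nil)

lemma pvSet_append_cons (u r : List Int) (x a : Int) :
    (u ++ x :: r).set u.length a = u ++ a :: r := by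
  induction u with
  | nil => simp
  | cons h tl ih => simp [List.set_cons_succ, ih]

lemma pvGetD_append_cons (u r : List Int) (x : Int) (d : Int) :
    (u ++ x :: r).getD u.length d = x := by
  induction u with
  | nil => simp
  | cons h tl ih => simpa using ih

lemma pvPerm_swap_mid (u v w : List Int) (x b : Int) :
    (u ++ b :: v ++ x :: w).Perm (u ++ x :: v ++ b :: w) := by
  simp only [List.append_assoc, List.cons_append]
  refine List.Perm.append_left u ?_
  exact ((List.Perm.cons b List.perm_middle).trans ((List.Perm.swap x b (v ++ w)).trans (List.Perm.cons x List.perm_middle.symm)))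

lemma correctRowGo_structure (rules : List (Int × List Int)) :
    ∀ (t pre : List Int) (seen : PySem.Set Int),
    (∀ z : Int, z ∈ seen ↔ z ∈ pre) →
    checkRowGo rules seen t = false →
    ∃ u x v b w, pre.reverse ++ t = u ++ x :: v ++ b :: w ∧ pvRb rules b x = true ∧
      correctRowGo rules pre seen t = u ++ b :: v ++ x :: w := by
  intro t
  induction t with
  | nil => intro pre seen h hc; simp [checkRowGo] at hc
  | cons a t ih =>
    intro pre seen hseen hc
    rcases hf : (((PySem.Dict.mk rules).get? a).getD []).find? (fun x => PySem.Set.contains seen x) with _ | x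
    · -- no violation here: recurse
      have hany : (((PySem.Dict.mk rules).get? a).getD []).any (fun x => PySem.Set.contains seen x) = false := by
        rw [List.any_eq_false]
        intro x hx
        have := List.find?_eq_none.mp hf x hx
        simpa using this
      have hc' : checkRowGo rules (PySem.Set.add seen a) t = false := by
        rw [checkRowGo, hany] at hc
        simpa using hc
      have hseen' : ∀ z : Int, z ∈ PySem.Set.add seen a ↔ z ∈ a :: pre := by
        intro z; rw [PySem.Set.mem_add, hseen]; simp; tauto
      obtain ⟨u, x, v, b, w, hdec, hrb, hres⟩ := ih (a :: pre) (PySem.Set.add seen a) hseen' hc'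
      refine ⟨u, x, v, b, w, ?_, hrb, ?_⟩
      · rw [← hdec]; simp
      · rw [correctRowGo, hf, ← hres]
    · -- violation at a: the swap
      have hxseen : x ∈ seen := by
        have := List.find?_some hf
        simpa [PySem.Set.contains_iff] using this
      have hxl : x ∈ (((PySem.Dict.mk rules).get? a).getD []) := List.mem_of_find?_eq_some hf
      have hxpre : x ∈ pre.reverse := by simpa using (hseen x).mp hxseen
      obtain ⟨k, hk⟩ := Option.isSome_iff_exists.mp ((PySem.List.index?_isSome_iff _ _).mpr hxpre)
      obtain ⟨u, v, huv, hlen, hxu⟩ := ((PySem.List.index?_eq_some_iff _ _ _).mp hk)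
      refine ⟨u, x, v, a, t, by simp [huv], ?_, ?_⟩
      · simp [pvRb, List.contains_iff_mem, hxl]
      · rw [correctRowGo, hf]
        have harr : pre.reverse ++ a :: t = u ++ x :: (v ++ a :: t) := by rw [huv]; simp
        have hidx : PySem.List.index? (pre.reverse ++ a :: t) x = some k := by
          rw [PySem.List.index?_append_of_mem _ hxpre]; exact hk
        simp only [hidx, Option.getD_some]
        have hjv : PySem.List.pyGetD (pre.reverse ++ a :: t) ((k : Nat) : Int) a = x := by
          rw [PySem.List.pyGetD_natCast, harr, ← hlen, pvGetD_append_cons]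
        rw [hjv]
        rw [PySem.List.pySetD_natCast, PySem.List.pySetD_natCast]
        rw [harr, ← hlen, pvSet_append_cons]
        have hlen2 : pre.reverse.length = (u ++ a :: v).length := by
          rw [huv]; simp
        rw [hlen2]
        have : u ++ a :: (v ++ a :: t) = (u ++ a :: v) ++ a :: t := by simp
        rw [this, pvSet_append_cons]

lemma pv_point (rules : List (Int × List Int)) (S : List Int) (x b c : Int)
    (hxS : x ∈ S) (hbS : b ∈ S) (hcS : c ∈ S)
    (hcx : c ≠ x) (hcb : c ≠ b) (hxb : x ≠ b)
    (htot : ∀ a ∈ S, ∀ a' ∈ S, a ≠ a' → pvRb rules a a' = !pvRb rules a' a)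
    (htr : ∀ a ∈ S, ∀ a' ∈ S, ∀ d ∈ S, pvRb rules a a' = true → pvRb rules a' d = true → pvRb rules a d = true)
    (hbx : pvRb rules b x = true) :
    (if pvRb rules c b then 1 else 0) + (if pvRb rules x c then 1 else 0) ≤
      (if pvRb rules c x then (1:Nat) else 0) + (if pvRb rules b c then 1 else 0) := by
  have hxb' : pvRb rules x b = false := by
    have := htot x hxS b hbS hxb
    rw [hbx] at this; simpa using this
  by_cases h1 : pvRb rules c x = true
  · have hxc : pvRb rules x c = false := by
      have := htot x hxS c hcS (Ne.symm hcx)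
      rw [h1] at this; simpa using this
    simp [h1, hxc]
    split <;> split <;> omega
  · by_cases h2 : pvRb rules b c = true
    · have hcb' : pvRb rules c b = false := by
        have := htot c hcS b hbS hcb
        rw [h2] at this; simpa using this
      simp [hcb', h2]
      split <;> omega
    · exfalso
      have hxc : pvRb rules x c = true := by
        have := htot c hcS x hxS hcx
        simp only [Bool.not_eq_true] at h1
        rw [h1] at this
        have := htot x hxS c hcS (Ne.symm hcx)
        rw [h1] at this; simpa using this
      have hcb' : pvRb rules c b = true := by
        have := htot c hcS b hbS hcb
        simp only [Bool.not_eq_true] at h2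
        rw [h2] at this; simpa using this
      have := htr x hxS c hcS b hbS hxc hcb'
      rw [hxb'] at this; cases this

lemma pv_vsum (rules : List (Int × List Int)) (S : List Int) (x b : Int)
    (hxS : x ∈ S) (hbS : b ∈ S) (hxb : x ≠ b)
    (htot : ∀ a ∈ S, ∀ a' ∈ S, a ≠ a' → pvRb rules a a' = !pvRb rules a' a)
    (htr : ∀ a ∈ S, ∀ a' ∈ S, ∀ d ∈ S, pvRb rules a a' = true → pvRb rules a' d = true → pvRb rules a d = true)
    (hbx : pvRb rules b x = true) :
    ∀ v : List Int, (∀ c ∈ v, c ∈ S ∧ c ≠ x ∧ c ≠ b) →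
    v.countP (fun y => pvRb rules y b) + v.countP (fun c => pvRb rules x c) ≤
      v.countP (fun y => pvRb rules y x) + v.countP (fun c => pvRb rules b c) := by
  intro v
  induction v with
  | nil => simp
  | cons c v ih =>
    intro h
    obtain ⟨hcS, hcx, hcb⟩ := h c (by simp)
    have hpt := pv_point rules S x b c hxS hbS hcS hcx hcb hxb htot htr hbx
    have hih := ih (fun d hd => h d (by simp [hd]))
    simp only [List.countP_cons]
    by_cases a1 : pvRb rules c b <;> by_cases a2 : pvRb rules x c <;>
      by_cases a3 : pvRb rules c x <;> by_cases a4 : pvRb rules b c <;>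
      simp [a1, a2, a3, a4] at hpt ⊢ <;> omega

lemma pvInv_swap_lt (rules : List (Int × List Int)) (S u v w : List Int) (x b : Int)
    (hnd : (u ++ x :: v ++ b :: w).Nodup)
    (hmem : ∀ z ∈ u ++ x :: v ++ b :: w, z ∈ S)
    (htot : ∀ a ∈ S, ∀ a' ∈ S, a ≠ a' → pvRb rules a a' = !pvRb rules a' a)
    (htr : ∀ a ∈ S, ∀ a' ∈ S, ∀ c ∈ S, pvRb rules a a' = true → pvRb rules a' c = true → pvRb rules a c = true)
    (hbx : pvRb rules b x = true) :
    pvInv rules (u ++ b :: v ++ x :: w) < pvInv rules (u ++ x :: v ++ b :: w) := by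
  -- distinctness facts
  have hnd1 : (x :: (v ++ b :: w)).Nodup := by
    have := hnd
    rw [show (u ++ x :: v ++ b :: w) = u ++ (x :: (v ++ b :: w)) by simp] at this
    exact (List.nodup_append.mp this).2.1
  have hxnotin : x ∉ v ++ b :: w := (List.nodup_cons.mp hnd1).1
  have hnd2 : (v ++ b :: w).Nodup := (List.nodup_cons.mp hnd1).2
  have hxb : x ≠ b := by simp at hxnotin; tauto
  have hcv : ∀ c ∈ v, c ≠ x ∧ c ≠ b := by
    intro c hc
    constructor
    · intro hcx; subst hcx; exact hxnotin (by simp [hc])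
    · intro hcb; subst hcb
      have h3 := (List.nodup_append.mp hnd2).2.2
      exact h3 c hc c (List.mem_cons_self) rfl
  have hxS : x ∈ S := hmem x (by simp)
  have hbS : b ∈ S := hmem b (by simp)
  have hvS : ∀ c ∈ v, c ∈ S := fun c hc => hmem c (by simp [hc])
  -- expand both inversion counts
  have e1 : (u ++ b :: v ++ x :: w) = u ++ ([b] ++ (v ++ ([x] ++ w))) := by simp
  have e2 : (u ++ x :: v ++ b :: w) = u ++ ([x] ++ (v ++ ([b] ++ w))) := by simp
  rw [e1, e2]
  have hcru : pvCross rules u ([b] ++ (v ++ ([x] ++ w))) = pvCross rules u ([x] ++ (v ++ ([b] ++ w))) := by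
    apply pvCross_perm
    have := pvPerm_swap_mid ([] : List Int) v w x b
    simpa using this
  rw [pvInv_append, pvInv_append]
  rw [hcru]
  simp only [pvInv_append, pvCross_append_right, pvCross_singleton_left, pvCross_singleton_right]
  simp only [pvInv, List.countP_append, List.countP_cons, List.countP_nil]
  have hxb' : pvRb rules x b = false := by
    have := htot x hxS b hbS hxb
    rw [hbx] at this; simpa using this
  have hvsum := pv_vsum rules S x b hxS hbS hxb htot htr hbx v
    (fun c hc => ⟨hvS c hc, (hcv c hc).1, (hcv c hc).2⟩)
  simp only [hbx, hxb', if_true, Bool.false_eq_true, if_false]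
  omega

lemma fixRow_spec (rules : List (Int × List Int)) (r₀ : List Int) (hsto : pvRowSTO rules r₀) :
    ∀ (fuel : Nat) (r : List Int), r.Perm r₀ → pvInv rules r < fuel →
      (fixRow rules fuel r).Perm r₀ ∧ checkRow rules (fixRow rules fuel r) = true := by
  intro fuel
  induction fuel with
  | zero => intro r _ h; omega
  | succ fuel ih =>
    intro r hperm hlt
    by_cases hc : checkRow rules r = true
    · simp only [fixRow, hc, if_true]; exact ⟨hperm, trivial⟩
    · have hc' : checkRow rules r = false := by simpa using hc
      simp only [fixRow, hc', Bool.false_eq_true, if_false]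
      have hcg : checkRowGo rules PySem.Set.empty r = false := hc'
      obtain ⟨u, x, v, b, w, hdec, hrb, hres⟩ :=
        correctRowGo_structure rules r [] PySem.Set.empty (by simp [PySem.Set.empty]) (by simpa using hcg)
      simp only [List.reverse_nil, List.nil_append] at hdec hres
      have hres' : correctRow rules r = u ++ b :: v ++ x :: w := hres
      have hperm' : (correctRow rules r).Perm r₀ := by
        rw [hres']
        exact (pvPerm_swap_mid u v w x b).trans (hdec ▸ hperm)
      have hnd : (u ++ x :: v ++ b :: w).Nodup := by
        rw [← hdec]; exact hperm.nodup_iff.mpr hsto.1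
      have hmem : ∀ z ∈ u ++ x :: v ++ b :: w, z ∈ r₀ := by
        intro z hz; rw [← hdec] at hz; exact hperm.mem_iff.mp hz
      have hdecr : pvInv rules (correctRow rules r) < pvInv rules r := by
        rw [hres', hdec]
        exact pvInv_swap_lt rules r₀ u v w x b hnd hmem hsto.2.1 hsto.2.2 hrb
      exact ih (correctRow rules r) hperm' (by omega)

lemma pred_count_at (rules : List (Int × List Int)) (S : List Int)
    (htot : ∀ a ∈ S, ∀ b ∈ S, a ≠ b → pvRb rules a b = !pvRb rules b a) :
    ∀ (r : List Int), (∀ z ∈ r, z ∈ S) → r.Nodup →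
      List.Pairwise (fun x y => pvRb rules y x = false) r →
      ∀ (k : Nat) (hk : k < r.length), predsB rules (r[k]) r = k := by
  intro r
  induction r with
  | nil => intro _ _ _ k hk; simp at hk
  | cons z t ih =>
    intro hS hnd hpw k hk
    have hz : ∀ y ∈ t, pvRb rules y z = false := (List.pairwise_cons.mp hpw).1
    match k with
    | 0 =>
      simp only [List.getElem_cons_zero, predsB]
      rw [List.countP_cons]
      have h1 : (z != z && (((PySem.Dict.mk rules).get? z).getD []).contains z) = false := by simp
      rw [h1]
      simp only [Bool.false_eq_true, if_false, Nat.add_zero]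
      apply List.countP_eq_zero.mpr
      intro y hy
      have h3 : (((PySem.Dict.mk rules).get? y).getD []).contains z = false := hz y hy
      intro ha
      rw [Bool.and_eq_true] at ha
      rw [h3] at ha
      exact absurd ha.2 (by simp)
    | k + 1 =>
      have hk' : k < t.length := by simpa using Nat.lt_of_succ_lt_succ hk
      simp only [List.getElem_cons_succ, predsB]
      rw [List.countP_cons]
      have hzt : z ∉ t := (List.nodup_cons.mp hnd).1
      have htk : t[k]'hk' ∈ t := List.getElem_mem _
      have hne : z ≠ t[k]'hk' := fun h => hzt (h ▸ htk)
      have hrb : pvRb rules z (t[k]'hk') = true := by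
        have h2 := htot z (hS z (by simp)) (t[k]'hk') (hS (t[k]'hk') (by simp [htk])) hne
        rw [hz (t[k]'hk') htk] at h2
        simpa using h2
      have hcond : (z != t[k]'hk' && (((PySem.Dict.mk rules).get? z).getD []).contains (t[k]'hk')) = true := by
        have heq : pvRb rules z (t[k]'hk') = (((PySem.Dict.mk rules).get? z).getD []).contains (t[k]'hk') := rfl
        rw [heq] at hrb
        simp only [hrb, Bool.and_true]
        simpa using hne
      rw [hcond]
      have hih := ih (fun y hy => hS y (by simp [hy])) (List.nodup_cons.mp hnd).2 (List.pairwise_cons.mp hpw).2 k hk'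
      rw [predsB] at hih
      rw [if_pos rfl, hih]

lemma find?_of_unique (p : Int → Bool) (r : List Int) (z : Int) (hz : z ∈ r)
    (h : ∀ x ∈ r, (p x = true ↔ x = z)) : r.find? p = some z := by
  induction r with
  | nil => cases hz
  | cons a t ih =>
    by_cases hpa : p a = true
    · have : a = z := (h a (by simp)).mp hpa
      subst this
      simp [hpa]
    · have hpa' : p a = false := by simpa using hpa
      have hzt : z ∈ t := by
        rcases List.mem_cons.mp hz with rfl | h'
        · exact absurd ((h z (by simp)).mpr rfl) hpa
        · exact h'
      rw [List.find?_cons, hpa']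
      exact ih hzt (fun x hx => h x (by simp [hx]))

lemma row_value (rules : List (Int × List Int)) (row : List Int) (hsto : pvRowSTO rules row)
    (hinv : checkRow rules row = false) :
    PySem.List.pyGetD (fixRow rules (row.length * row.length + 1) row)
        (PySem.Int.floordiv (PySem.List.len (fixRow rules (row.length * row.length + 1) row)) 2) 0
      = (row.find? (fun x => predsB rules x row == row.length / 2)).getD 0 := by
  obtain ⟨hperm, hchk⟩ := fixRow_spec rules row hsto (row.length * row.length + 1) row
    (List.Perm.refl row) (by have := pvInv_le rules row; omega)
  set r' := fixRow rules (row.length * row.length + 1) row with hr'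
  have hpw : List.Pairwise (fun x y => pvRb rules y x = false) r' :=
    (checkRow_eq_true_iff rules r').mp hchk
  have hnd' : r'.Nodup := hperm.nodup_iff.mpr hsto.1
  have hlen : r'.length = row.length := hperm.length_eq
  have hne : row ≠ [] := by
    rintro rfl
    simp [checkRow, checkRowGo] at hinv
  have hpos : 0 < row.length := List.length_pos_of_ne_nil hne
  have hmid : row.length / 2 < row.length := Nat.div_lt_self hpos (by norm_num)
  have hmid' : row.length / 2 < r'.length := by omega
  have hA : PySem.List.pyGetD r' (PySem.Int.floordiv (PySem.List.len r') 2) 0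
      = r'[row.length / 2]'hmid' := by
    rw [PySem.List.len_eq]
    have h2 : PySem.Int.floordiv ((r'.length : Nat) : Int) ((2 : Nat) : Int)
        = ((r'.length / 2 : Nat) : Int) := PySem.Int.floordiv_natCast _ _
    rw [show ((2:Nat):Int) = (2:Int) from rfl] at h2
    rw [h2, PySem.List.pyGetD_natCast]
    rw [List.getD_eq_getElem _ _ (by omega)]
    congr 1
    omega
  have key : ∀ x ∈ row, ((predsB rules x row == row.length / 2) = true ↔ x = r'[row.length / 2]'hmid') := by
    intro x hx
    have hxr' : x ∈ r' := hperm.mem_iff.mpr hx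
    obtain ⟨k, hk, hkx⟩ := List.getElem_of_mem hxr'
    have hpredr : ∀ (m : Nat) (hm : m < r'.length), predsB rules (r'[m]'hm) row = m := by
      intro m hm
      have e1 : predsB rules (r'[m]'hm) row = predsB rules (r'[m]'hm) r' := by
        rw [predsB, predsB]
        exact (hperm.countP_eq _).symm
      rw [e1]
      exact pred_count_at rules row hsto.2.1 r' (fun z hz => hperm.subset hz) hnd' hpw m hm
    constructor
    · intro hbeq
      have hkm : predsB rules x row = row.length / 2 := (by simpa using hbeq)
      have : predsB rules x row = k := by rw [← hkx]; exact hpredr k hk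
      have hkmid : k = row.length / 2 := by omega
      subst hkmid
      exact hkx.symm
    · intro hxz
      have : predsB rules x row = row.length / 2 := by rw [hxz]; exact hpredr _ hmid'
      simp [this]
  have hzmem : r'[row.length / 2]'hmid' ∈ row := hperm.subset (List.getElem_mem _)
  rw [find?_of_unique _ row _ hzmem key]
  rw [hA]
  rfl

lemma fold_eq (rules : List (Int × List Int)) :
    ∀ (data : List (List Int)), (∀ r ∈ data, pvRowValid rules r ∨ pvRowSTO rules r) → ∀ acc : Int,
    data.foldl (fun res row =>
      if checkRow rules row then res
      else res + PySem.List.pyGetD (fixRow rules (row.length * row.length + 1) row)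
        (PySem.Int.floordiv (PySem.List.len (fixRow rules (row.length * row.length + 1) row)) 2) 0) acc
    = data.foldl (fun res row =>
      if violatesGo rules [] row then
        res + ((row.find? (fun x => predsB rules x row == row.length / 2)).getD 0)
      else res) acc := by
  intro data
  induction data with
  | nil => intro _ acc; simp
  | cons row rest ih =>
    intro h acc
    simp only [List.foldl_cons]
    have hstep : (if checkRow rules row then acc
        else acc + PySem.List.pyGetD (fixRow rules (row.length * row.length + 1) row)
          (PySem.Int.floordiv (PySem.List.len (fixRow rules (row.length * row.length + 1) row)) 2) 0)
        = (if violatesGo rules [] row then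
            acc + ((row.find? (fun x => predsB rules x row == row.length / 2)).getD 0)
          else acc) := by
      by_cases hc : checkRow rules row = true
      · have hv : violatesGo rules [] row = false :=
          (violatesGo_eq_false_iff rules row []).mpr
            ⟨fun a _ z hz => absurd hz (List.not_mem_nil), (checkRow_eq_true_iff rules row).mp hc⟩
        rw [hc, hv]
        simp
      · have hc' : checkRow rules row = false := by simpa using hc
        have hsto : pvRowSTO rules row := by
          rcases h row (by simp) with hvld | hsto
          · exact absurd ((checkRow_eq_true_iff rules row).mpr hvld) (by simp [hc'])
          · exact hsto
        have hv : violatesGo rules [] row = true := by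
          by_contra hvf
          have hvf' : violatesGo rules [] row = false := by simpa using hvf
          have := ((violatesGo_eq_false_iff rules row []).mp hvf').2
          exact absurd ((checkRow_eq_true_iff rules row).mpr this) (by simp [hc'])
        rw [hc', hv]
        simp only [Bool.false_eq_true, if_false, if_true]
        rw [row_value rules row hsto hc']
    rw [hstep]
    exact ih (fun r hr => h r (by simp [hr])) _

-- ===== VERDICT (by name: the statement is the Claim_ definition above) =====
theorem p2_sol_spec : Claim_equal_p2_sol := by
  intro data rules _ hpre
  show p2_sol data rules = p2_sol_alt data rules
  unfold p2_sol p2_sol_alt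
  exact fold_eq rules data hpre 0
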